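-- pv_equiv track=rewrite | github.com/ruberobo/labs-de-ironhack | module-1/pandas-project/your-code/funciones.py | activity
-- ===== SOURCE A (Python) =====
-- def activity(x):
--     try:
--         y = x.split()
--         for z in y:
--             if z.endswith('ing'):
--                 return z
--     except:
--         pass
-- ===== SOURCE B (Python) =====
-- def activity(x):
--     tok = ''
--     for c in x:
--         if c in ' \t\n\r\x0b\x0c':
--             if tok.endswith('ing'):
--                 return tok
--             tok = ''
--         else:
--             tok += c
--     if tok.endswith('ing'):
--         return tok
--     return None
-- ===== Notes on version B (the rewrite author's own statement) =====
-- stated objective: alternative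
-- what changed: Replaces split()-then-scan (which materialises the whole word list) with a single left-to-right character scan that accumulates the current token and returns it at the first whitespace boundary where it carries the required suffix.
import Mathlib
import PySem

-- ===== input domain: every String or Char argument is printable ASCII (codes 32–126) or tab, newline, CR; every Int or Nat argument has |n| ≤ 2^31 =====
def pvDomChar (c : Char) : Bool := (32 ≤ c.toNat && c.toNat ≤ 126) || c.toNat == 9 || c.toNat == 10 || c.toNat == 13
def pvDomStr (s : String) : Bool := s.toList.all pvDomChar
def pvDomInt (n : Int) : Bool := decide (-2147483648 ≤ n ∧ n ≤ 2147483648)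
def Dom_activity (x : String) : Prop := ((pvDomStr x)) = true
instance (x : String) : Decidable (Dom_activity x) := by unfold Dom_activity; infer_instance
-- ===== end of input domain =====

-- B replaces split()-then-scan by a single character scan accumulating the current token; alternative decomposition, same cost.

-- ===== PORT A =====
-- the 'for z in y: if z.endswith("ing"): return z' loop
def activityGoA : List String → Option String
  | [] => none
  | z :: rest => if PySem.Str.endswith z "ing" then some z else activityGoA rest

def activity (x : String) : Option String :=
  activityGoA (PySem.Str.split₀ x)

-- ===== PORT B =====
-- the character loop of Source B; tok is the current token being accumulated
def activityScanB : List Char → List Char → Option String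
  | [], tok => if PySem.Chars.endswith tok ['i','n','g'] then some (String.ofList tok) else none
  | c :: rest, tok =>
      if c ∈ [' ', '\t', '\n', '\r', '\x0b', '\x0c'] then
        if PySem.Chars.endswith tok ['i','n','g'] then some (String.ofList tok)
        else activityScanB rest []
      else activityScanB rest (tok ++ [c])

def activity_alt (x : String) : Option String :=
  activityScanB x.toList []

-- ===== PRECONDITION & SPEC =====
def Spec_activity (x : String) (out : Option String) : Prop := out = activity_alt x
instance (x : String) (out : Option String) : Decidable (Spec_activity x out) := by unfold Spec_activity; infer_instance

-- ===== CLAIM (what is proved, stated in full; the proofs are below) =====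
def Claim_equal_activity : Prop := ∀ (x : String), Dom_activity x → Spec_activity x (activity x)

-- ===== LEMMAS AND PROOFS =====

-- Chars-level version of A's loop
def findIngC : List (List Char) → Option (List Char)
  | [] => none
  | t :: ts => if PySem.Chars.endswith t ['i','n','g'] then some t else findIngC ts

theorem activityGoA_map (ts : List (List Char)) :
    activityGoA (ts.map String.ofList) = (findIngC ts).map String.ofList := by
  have hing : "ing".toList = ['i','n','g'] := rfl
  induction ts with
  | nil => rfl
  | cons t ts ih =>
      have ht : (String.ofList t).toList = t := by simp
      simp only [List.map, activityGoA, findIngC, PySem.Str.endswith_eq, ht, hing]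
      by_cases h : PySem.Chars.endswith t ['i','n','g']
      · simp [h]
      · simp [h, ih]

theorem split₀_go_acc (cs : List Char) (cur : List Char) (acc : List (List Char)) :
    PySem.Chars.split₀.go cs cur acc = acc.reverse ++ PySem.Chars.split₀.go cs cur [] := by
  induction cs generalizing cur acc with
  | nil =>
      simp only [PySem.Chars.split₀.go]
      by_cases h : cur.isEmpty <;> simp [h]
  | cons c rest ih =>
      simp only [PySem.Chars.split₀.go]
      by_cases hs : PySem.Chars.isspace c
      · by_cases h : cur.isEmpty
        · simp only [hs, h, if_true]
          exact ih [] acc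
        · simp only [hs, h, if_true, if_false, Bool.false_eq_true]
          rw [ih [] (cur.reverse :: acc), ih [] [cur.reverse]]
          simp
      · simp only [hs, Bool.false_eq_true, if_false]
        exact ih (c :: cur) acc

theorem char_eq_of_toNat_eq (c d : Char) (e : c.toNat = d.toNat) : c = d := by
  have h1 := Char.ofNat_toNat c
  have h2 := Char.ofNat_toNat d
  rw [← h1, ← h2, e]

theorem dom_isspace (c : Char) (h : pvDomChar c = true) :
    PySem.Chars.isspace c = decide (c ∈ [' ', '\t', '\n', '\r', '\x0b', '\x0c']) := by
  simp only [pvDomChar, Bool.or_eq_true, Bool.and_eq_true, decide_eq_true_eq, beq_iff_eq] at h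
  rw [Bool.eq_iff_iff]
  simp only [PySem.Chars.isspace, Bool.or_eq_true, Bool.and_eq_true, decide_eq_true_eq,
    List.mem_cons, List.not_mem_nil, or_false]
  constructor
  · intro hs
    have hn : c.toNat = 32 ∨ c.toNat = 9 ∨ c.toNat = 10 ∨ c.toNat = 13 := by omega
    rcases hn with e | e | e | e
    · exact Or.inl (char_eq_of_toNat_eq c ' ' e)
    · exact Or.inr (Or.inl (char_eq_of_toNat_eq c '\t' e))
    · exact Or.inr (Or.inr (Or.inl (char_eq_of_toNat_eq c '\n' e)))
    · exact Or.inr (Or.inr (Or.inr (Or.inl (char_eq_of_toNat_eq c '\r' e))))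
  · rintro (rfl | rfl | rfl | rfl | rfl | rfl) <;> decide

theorem scan_eq (cs : List Char) (tok : List Char) (hdom : ∀ c ∈ cs, pvDomChar c = true) :
    activityScanB cs tok
      = (findIngC (PySem.Chars.split₀.go cs tok.reverse [])).map String.ofList := by
  induction cs generalizing tok with
  | nil =>
      by_cases htok : tok = []
      · subst htok; rfl
      · simp only [activityScanB, PySem.Chars.split₀.go]
        have : tok.reverse.isEmpty = false := by
          simp [htok]
        simp only [this, Bool.false_eq_true, if_false, List.reverse_reverse]
        by_cases h : PySem.Chars.endswith tok ['i','n','g'] <;> simp [h, findIngC]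
  | cons c rest ih =>
      have hc := hdom c (List.mem_cons_self ..)
      have hrest : ∀ d ∈ rest, pvDomChar d = true := fun d hd => hdom d (List.mem_cons_of_mem _ hd)
      simp only [activityScanB, PySem.Chars.split₀.go, dom_isspace c hc]
      by_cases hmem : c ∈ [' ', '\t', '\n', '\r', '\x0b', '\x0c']
      · simp only [hmem, decide_true, if_true]
        by_cases htok : tok = []
        · subst htok
          simp only [List.reverse_nil, List.isEmpty_nil, if_true]
          simpa [PySem.Chars.endswith] using ih [] hrest
        · have hne : tok.reverse.isEmpty = false := by
            simp [htok]
          simp only [hne, Bool.false_eq_true, if_false, List.reverse_reverse]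
          rw [split₀_go_acc rest [] [tok]]
          simp only [List.reverse_cons, List.reverse_nil, List.nil_append, List.singleton_append,
            findIngC]
          by_cases h : PySem.Chars.endswith tok ['i','n','g'] <;> simp [h, ih [] hrest]
      · simp only [hmem, decide_false, Bool.false_eq_true, if_false]
        have := ih (tok ++ [c]) hrest
        rw [this]
        simp

theorem toList_all (x : String) (h : Dom_activity x) : ∀ c ∈ x.toList, pvDomChar c = true := by
  simpa [Dom_activity, pvDomStr, List.all_eq_true] using h

-- ===== VERDICT (by name: the statement is the Claim_ definition above) =====
theorem activity_spec : Claim_equal_activity := by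
  intro x hd
  unfold Spec_activity activity activity_alt PySem.Str.split₀
  rw [scan_eq x.toList [] (toList_all x hd)]
  simp [PySem.Chars.split₀, activityGoA_map]
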